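-- pv_equiv track=rewrite | github.com/ppgranger/token-saving | src/processors/system_info.py | _process_wc
-- ===== SOURCE A (Python) =====
-- def _process_wc(output: str) -> str:
--     """Compress wc: sort by count, top entries + total."""
--     lines = output.splitlines()
--     if len(lines) <= 15:
--         return output
--
--     entries = []
--     total_line = ""
--
--     for line in lines:
--         stripped = line.strip()
--         if not stripped:
--             continue
--         parts = stripped.split()
--         if len(parts) >= 2:
--             if parts[-1] == "total":
--                 total_line = stripped
--             else:
--                 try:
--                     count = int(parts[0])
--                     entries.append((count, stripped))
--                 except ValueError:
--                     entries.append((0, stripped))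
--
--     if not entries:
--         return output
--
--     entries.sort(key=lambda x: x[0], reverse=True)
--
--     # Filter zero entries
--     non_zero = [(c, line) for c, line in entries if c > 0]
--     zero_count = len(entries) - len(non_zero)
--
--     result = []
--     for _, line in non_zero[:15]:
--         result.append(f"  {line}")
--     if len(non_zero) > 15:
--         result.append(f"  ... ({len(non_zero) - 15} more)")
--     if zero_count > 0:
--         result.append(f"  ({zero_count} entries with count 0)")
--     if total_line:
--         result.append(total_line)
--
--     return "\n".join(result)
-- ===== SOURCE B (Python) =====
-- def _process_wc(output: str) -> str:
--     """Compress wc output in one pass: keep a bounded top-15 buffer instead of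
--     sorting all entries, plus running counters for zero entries and overflow."""
--     lines = output.splitlines()
--     if len(lines) <= 15:
--         return output
--
--     top = []          # at most 15 (count, line) pairs, descending, stable
--     nz = 0            # how many entries have count > 0
--     zeros = 0         # how many entries have count <= 0 (or unparsable count)
--     total_line = ""
--     any_entry = False
--
--     for line in lines:
--         stripped = line.strip()
--         if not stripped:
--             continue
--         parts = stripped.split()
--         if len(parts) < 2:
--             continue
--         if parts[-1] == "total":
--             total_line = stripped
--             continue
--         any_entry = True
--         try:
--             count = int(parts[0])
--         except ValueError:
--             count = 0
--         if count <= 0: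
--             zeros += 1
--             continue
--         nz += 1
--         if len(top) < 15 or count > top[-1][0]:
--             for i, (c, _) in enumerate(top):
--                 if c < count:
--                     top.insert(i, (count, stripped))
--                     break
--             else:
--                 top.append((count, stripped))
--             if len(top) > 15:
--                 top.pop()
--
--     if not any_entry:
--         return output
--
--     result = ["  " + line for _, line in top]
--     if nz > 15:
--         result.append(f"  ... ({nz - 15} more)")
--     if zeros > 0:
--         result.append(f"  ({zeros} entries with count 0)")
--     if total_line:
--         result.append(total_line)
--
--     return "\n".join(result)
-- ===== Notes on version B (the rewrite author's own statement) =====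
-- stated objective: alternative
-- what changed: B replaces A's build-all-entries-then-stable-sort-then-filter pipeline by a single pass that keeps a bounded stable top-15 buffer (insertion into at most 15 kept entries, truncating overflow) plus running counters for positive and zero-count entries, so no full entry list and no full sort are ever built.
import Mathlib
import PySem

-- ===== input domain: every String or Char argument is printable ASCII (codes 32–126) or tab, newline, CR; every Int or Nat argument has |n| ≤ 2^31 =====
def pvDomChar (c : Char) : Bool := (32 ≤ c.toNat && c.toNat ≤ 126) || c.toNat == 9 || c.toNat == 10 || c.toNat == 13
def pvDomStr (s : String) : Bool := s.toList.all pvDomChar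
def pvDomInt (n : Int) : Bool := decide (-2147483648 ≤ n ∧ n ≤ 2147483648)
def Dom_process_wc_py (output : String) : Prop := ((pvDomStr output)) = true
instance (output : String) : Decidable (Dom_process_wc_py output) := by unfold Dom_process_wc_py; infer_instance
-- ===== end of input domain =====

-- B replaces A's full sort of all entries by a single pass that keeps a bounded
-- top-15 buffer and running counters (alternative algorithm, same output).

-- ===== PORT A =====
-- A's parsing loop: state = (entries, total_line)
def pvStepA (st : List (Int × List Char) × List Char) (line : List Char) :
    List (Int × List Char) × List Char :=
  let stripped := PySem.Chars.strip line
  if stripped = [] then st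
  else
    let parts := PySem.Chars.split₀ stripped
    if 2 ≤ parts.length then
      -- parts is nonempty here, so parts[-1] / parts[0] are total accesses
      if parts.getLastD [] = "total".toList then (st.1, stripped)
      else
        match PySem.Int.ofChars? parts.headI with
        | some c => (st.1 ++ [(c, stripped)], st.2)
        | none => (st.1 ++ [(0, stripped)], st.2)
    else st

def process_wc_py (output : String) : String :=
  let lines := PySem.Chars.splitlines output.toList
  if lines.length ≤ 15 then output
  else
    let st := lines.foldl pvStepA ([], [])
    let entries := st.1
    let total_line := st.2
    if entries = [] then output
    else
      let sortedE := PySem.List.sorted entries (fun x => x.1) true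
      let non_zero := sortedE.filter (fun x => decide (0 < x.1))
      let zero_count : Int := (sortedE.length : Int) - non_zero.length
      let result :=
        (non_zero.take 15).map (fun x => ' ' :: ' ' :: x.2)
        ++ (if 15 < non_zero.length then
              ["  ... (".toList ++ PySem.Int.toChars ((non_zero.length : Int) - 15) ++ " more)".toList]
            else [])
        ++ (if 0 < zero_count then
              ["  (".toList ++ PySem.Int.toChars zero_count ++ " entries with count 0)".toList]
            else [])
        ++ (if total_line ≠ [] then [total_line] else [])
      String.ofList (PySem.Chars.join ['\n'] result)

-- ===== PORT B =====
-- B's bounded insertion: scan for the first entry with a smaller count, insert there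
def pvInsDesc (x : Int × List Char) : List (Int × List Char) → List (Int × List Char)
  | [] => [x]
  | y :: ys => if y.1 < x.1 then x :: y :: ys else y :: pvInsDesc x ys

-- B's single pass: state = (top, nz, zeros, total_line, any_entry)
def pvStepB (st : List (Int × List Char) × Int × Int × List Char × Bool) (line : List Char) :
    List (Int × List Char) × Int × Int × List Char × Bool :=
  match st with
  | (top, nz, zeros, total, seen) =>
    let stripped := PySem.Chars.strip line
    if stripped = [] then (top, nz, zeros, total, seen)
    else
      let parts := PySem.Chars.split₀ stripped
      if parts.length < 2 then (top, nz, zeros, total, seen)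
      else if parts.getLastD [] = "total".toList then (top, nz, zeros, stripped, seen)
      else
        let count := (PySem.Int.ofChars? parts.headI).getD 0
        if count ≤ 0 then (top, nz, zeros + 1, total, true)
        else
          let top' :=
            if top.length < 15 ∨ (top.getLastD (0, [])).1 < count then
              let t := pvInsDesc (count, stripped) top
              if 15 < t.length then t.dropLast else t
            else top
          (top', nz + 1, zeros, total, true)

def process_wc_py_alt (output : String) : String :=
  let lines := PySem.Chars.splitlines output.toList
  if lines.length ≤ 15 then output
  else
    let st := lines.foldl pvStepB ([], 0, 0, [], false)
    match st with
    | (top, nz, zeros, total_line, seen) =>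
      if seen = false then output
      else
        let result :=
          top.map (fun x => ' ' :: ' ' :: x.2)
          ++ (if 15 < nz then
                ["  ... (".toList ++ PySem.Int.toChars (nz - 15) ++ " more)".toList]
              else [])
          ++ (if 0 < zeros then
                ["  (".toList ++ PySem.Int.toChars zeros ++ " entries with count 0)".toList]
              else [])
          ++ (if total_line ≠ [] then [total_line] else [])
        String.ofList (PySem.Chars.join ['\n'] result)

-- ===== PRECONDITION & SPEC =====
def Spec_process_wc_py (output : String) (out : String) : Prop := out = process_wc_py_alt output
instance (output : String) (out : String) : Decidable (Spec_process_wc_py output out) := by unfold Spec_process_wc_py; infer_instance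

-- ===== CLAIM (what is proved, stated in full; the proofs are below) =====
def Claim_equal_process_wc_py : Prop := ∀ (output : String), Dom_process_wc_py output → Spec_process_wc_py output (process_wc_py output)

-- ===== LEMMAS AND PROOFS =====

-- B's state as a function of A's state (the simulation invariant)
def pvF (st : List (Int × List Char) × List Char) :
    List (Int × List Char) × Int × Int × List Char × Bool :=
  let P := st.1.filter (fun x => decide (0 < x.1))
  ((PySem.List.sorted P (fun x => x.1) true).take 15,
   (P.length : Int),
   (st.1.length : Int) - (P.length : Int),
   st.2,
   !st.1.isEmpty)

theorem pvInsDesc_eq (x : Int × List Char) (l : List (Int × List Char)) :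
    pvInsDesc x l = PySem.List.insertBy (fun a b => decide (b.1 < a.1)) x l := by
  induction l with
  | nil => rfl
  | cons y ys ih => simp [pvInsDesc, PySem.List.insertBy, ih]

theorem pvInsertBy_append {α : Type} (bef : α → α → Bool) (x : α) (s t : List α) :
    PySem.List.insertBy bef x (s ++ t) =
      if s.any (bef x) then PySem.List.insertBy bef x s ++ t
      else s ++ PySem.List.insertBy bef x t := by
  induction s with
  | nil => simp
  | cons y ys ih =>
    by_cases h : bef x y
    · simp [PySem.List.insertBy, h]
    · simp [PySem.List.insertBy, h, ih]
      split_ifs <;> simp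

theorem pvInsertBy_front {α : Type} (bef : α → α → Bool) (x : α) (l : List α)
    (h : ∀ z ∈ l, bef x z = true) :
    PySem.List.insertBy bef x l = x :: l := by
  cases l with
  | nil => rfl
  | cons y ys => simp [PySem.List.insertBy, h y (by simp)]

theorem pvLength_insertBy {α : Type} (bef : α → α → Bool) (x : α) (l : List α) :
    (PySem.List.insertBy bef x l).length = l.length + 1 := by
  induction l with
  | nil => rfl
  | cons y ys ih =>
    by_cases h : bef x y <;> simp [PySem.List.insertBy, h, ih]

theorem pvPairwise_getElem (s : List (Int × List Char))
    (h : s.Pairwise (fun a b => b.1 ≤ a.1)) (i j : Nat) (hij : i ≤ j) (hj : j < s.length) :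
    (s[j]'hj).1 ≤ (s[i]'(lt_of_le_of_lt hij hj)).1 := by
  rcases eq_or_lt_of_le hij with rfl | hlt
  · rfl
  · exact List.pairwise_iff_getElem.mp h i j _ hj hlt

theorem pvSorted_snoc (P : List (Int × List Char)) (x : Int × List Char) :
    PySem.List.sorted (P ++ [x]) (fun y => y.1) true =
      PySem.List.insertBy (fun a b => decide (b.1 < a.1)) x
        (PySem.List.sorted P (fun y => y.1) true) := by
  rw [PySem.List.sorted_rev_eq_foldl_insertBy, PySem.List.sorted_rev_eq_foldl_insertBy,
    List.foldl_append]
  rfl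

theorem pvFilter_insertBy (x : Int × List Char) (acc : List (Int × List Char))
    (h : acc.Pairwise (fun a b => b.1 ≤ a.1)) :
    (PySem.List.insertBy (fun a b => decide (b.1 < a.1)) x acc).filter (fun y => decide (0 < y.1)) =
      if 0 < x.1 then
        PySem.List.insertBy (fun a b => decide (b.1 < a.1)) x
          (acc.filter (fun y => decide (0 < y.1)))
      else acc.filter (fun y => decide (0 < y.1)) := by
  induction acc with
  | nil =>
    by_cases hx : 0 < x.1 <;> simp [PySem.List.insertBy, List.filter, hx]
  | cons y ys ih =>
    rw [List.pairwise_cons] at h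
    obtain ⟨hy, hys⟩ := h
    by_cases hb : y.1 < x.1
    · -- insert in front
      by_cases hx : 0 < x.1
      · by_cases hpy : 0 < y.1
        · simp [PySem.List.insertBy, hb, hx, hpy, List.filter]
        · -- y filtered out; x goes to the front of filter ys
          have hfront : PySem.List.insertBy (fun a b => decide (b.1 < a.1)) x
              (ys.filter (fun y => decide (0 < y.1))) = x :: ys.filter (fun y => decide (0 < y.1)) := by
            apply pvInsertBy_front
            intro z hz
            have := hy z (List.mem_of_mem_filter hz)
            simp
            omega
          simp [PySem.List.insertBy, hb, hx, hpy, List.filter, hfront]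
      · simp [PySem.List.insertBy, hb, hx, List.filter]
    · -- recurse
      simp only [PySem.List.insertBy, decide_eq_true_eq, hb]
      by_cases hpy : 0 < y.1
      · simp [List.filter, hpy, ih hys, PySem.List.insertBy, hb]
        split_ifs <;> simp
      · simp [List.filter, hpy, ih hys]

theorem pvFilter_sorted (entries : List (Int × List Char)) :
    (PySem.List.sorted entries (fun x => x.1) true).filter (fun x => decide (0 < x.1)) =
      PySem.List.sorted (entries.filter (fun x => decide (0 < x.1))) (fun x => x.1) true := by
  induction entries using List.reverseRecOn with
  | nil => rfl
  | append_singleton l x ih =>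
    rw [pvSorted_snoc, pvFilter_insertBy x _ (PySem.List.sorted_pairwise_rev l (fun y => y.1)),
      List.filter_append, ih]
    by_cases hx : 0 < x.1
    · simp [List.filter, hx, pvSorted_snoc]
    · simp [List.filter, hx]

theorem pvTopStep (s : List (Int × List Char)) (x : Int × List Char)
    (h : s.Pairwise (fun a b => b.1 ≤ a.1)) :
    (if (s.take 15).length < 15 ∨ ((s.take 15).getLastD (0, [])).1 < x.1 then
       let t := pvInsDesc x (s.take 15)
       if 15 < t.length then t.dropLast else t
     else s.take 15) =
      (PySem.List.insertBy (fun a b => decide (b.1 < a.1)) x s).take 15 := by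
  rcases lt_or_ge s.length 15 with hlen | hlen
  · rw [List.take_of_length_le (le_of_lt hlen)]
    rw [if_pos (Or.inl hlen)]
    simp only [pvInsDesc_eq, pvLength_insertBy]
    rw [if_neg (by omega), List.take_of_length_le (by rw [pvLength_insertBy]; omega)]
  · have htl : (s.take 15).length = 15 := by simp [List.length_take]; omega
    have h14 : 14 < s.length := by omega
    have hlast : ((s.take 15).getLastD (0, [])).1 = (s[14]'h14).1 := by
      have hne : s.take 15 ≠ [] := by
        intro hc; rw [hc] at htl; simp at htl
      rw [List.getLastD_eq_getLast?, List.getLast?_eq_some_getLast hne]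
      rw [List.getLast_eq_getElem]
      simp only [Option.getD_some, htl]
      congr 1
      exact List.getElem_take
    have hsplit : s = s.take 15 ++ s.drop 15 := (List.take_append_drop 15 s).symm
    by_cases hx : (s[14]'h14).1 < x.1
    · rw [if_pos (Or.inr (by rw [hlast]; exact hx))]
      have hany : (s.take 15).any (fun b => decide (b.1 < x.1)) = true := by
        rw [List.any_eq_true]
        have hmem : (s[14]'h14) ∈ s.take 15 := by
          have heq : (s.take 15)[14]'(by omega) = s[14]'h14 := List.getElem_take
          rw [← heq]; exact List.getElem_mem _
        exact ⟨s[14]'h14, hmem, by simp [hx]⟩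
      conv_rhs => rw [hsplit]
      rw [pvInsertBy_append, if_pos hany]
      simp only [pvInsDesc_eq]
      have hlt : 15 < (PySem.List.insertBy (fun a b => decide (b.1 < a.1)) x (s.take 15)).length := by
        rw [pvLength_insertBy, htl]; omega
      rw [if_pos hlt]
      rw [List.take_append]
      rw [List.dropLast_eq_take, pvLength_insertBy, htl]
      simp
    · rw [if_neg (by rw [hlast]; omega)]
      have hany : (s.take 15).any (fun b => decide (b.1 < x.1)) = false := by
        rw [List.any_eq_false]
        intro y hy
        rw [List.mem_iff_getElem] at hy
        obtain ⟨i, hi, rfl⟩ := hy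
        have hi15 : i < 15 := by omega
        have := pvPairwise_getElem s h i 14 (by omega) h14
        simp only [List.getElem_take]
        simp only [decide_eq_true_eq, not_lt]
        have : (s[14]'h14).1 ≤ (s[i]'(by omega)).1 := pvPairwise_getElem s h i 14 (by omega) h14
        omega
      conv_rhs => rw [hsplit]
      rw [pvInsertBy_append, if_neg (by rw [hany]; simp)]
      rw [List.take_append, htl]
      simp

theorem pvSortedPW (P : List (Int × List Char)) :
    (PySem.List.sorted P (fun x => x.1) true).Pairwise (fun a b => b.1 ≤ a.1) :=
  PySem.List.sorted_pairwise_rev P (fun x => x.1)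

theorem pvStep_sim (st : List (Int × List Char) × List Char) (line : List Char) :
    pvStepB (pvF st) line = pvF (pvStepA st line) := by
  obtain ⟨entries, total⟩ := st
  simp only [pvStepA, pvStepB, pvF]
  generalize PySem.Chars.strip line = s
  by_cases h1 : s = []
  · simp only [if_pos h1]
  · simp only [if_neg h1]
    generalize PySem.Chars.split₀ s = ps
    by_cases h2 : 2 ≤ ps.length
    · simp only [if_pos h2, if_neg (show ¬ ps.length < 2 by omega)]
      by_cases h3 : ps.getLastD [] = "total".toList
      · simp only [if_pos h3]
      · simp only [if_neg h3]
        rcases hc : PySem.Int.ofChars? ps.headI with _ | c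
        · simp only [Option.getD_none]
          rw [if_pos (le_refl (0:Int))]
          simp only [List.filter_append, List.filter_cons, List.filter_nil,
            decide_eq_true_eq, if_neg (show ¬ (0:Int) < 0 by omega), List.append_nil,
            List.length_append, List.length_cons, List.length_nil, Prod.mk.injEq]
          simp
          push_cast
          omega
        · simp only [Option.getD_some]
          by_cases hcle : c ≤ 0
          · rw [if_pos hcle]
            simp only [List.filter_append, List.filter_cons, List.filter_nil,
              decide_eq_true_eq, if_neg (show ¬ (0:Int) < c by omega), List.append_nil,
              List.length_append, List.length_cons, List.length_nil, Prod.mk.injEq]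
            simp
            push_cast
            omega
          · rw [if_neg hcle]
            have hc0 : (0:Int) < c := by omega
            have htop := pvTopStep
              (PySem.List.sorted (entries.filter (fun x => decide (0 < x.1))) (fun x => x.1) true)
              (c, s) (pvSortedPW _)
            simp only at htop
            rw [htop]
            simp only [List.filter_append, List.filter_cons, List.filter_nil,
              decide_eq_true_eq, if_pos hc0,
              List.length_append, List.length_cons, List.length_nil, Prod.mk.injEq]
            refine ⟨by rw [pvSorted_snoc], by push_cast; omega, by push_cast; omega, ?_, by simp⟩
            simp
    · simp only [if_neg h2, if_pos (show ps.length < 2 by omega)]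

theorem pvFold_sim (lines : List (List Char)) (st : List (Int × List Char) × List Char) :
    lines.foldl pvStepB (pvF st) = pvF (lines.foldl pvStepA st) := by
  induction lines generalizing st with
  | nil => rfl
  | cons l ls ih => simp only [List.foldl_cons, pvStep_sim, ih]

-- ===== VERDICT (by name: the statement is the Claim_ definition above) =====
theorem process_wc_py_spec : Claim_equal_process_wc_py := by
  intro output _
  unfold Spec_process_wc_py
  simp only [process_wc_py, process_wc_py_alt]
  generalize PySem.Chars.splitlines output.toList = lines
  by_cases hlen : lines.length ≤ 15
  · simp [hlen]
  · simp only [if_neg hlen]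
    have hfold : lines.foldl pvStepB ([], 0, 0, [], false) =
        pvF (lines.foldl pvStepA ([], [])) := by
      have h0 : pvF ([], []) = ([], 0, 0, [], false) := by decide
      rw [← h0, pvFold_sim]
    rw [hfold]
    obtain ⟨entries, total⟩ := lines.foldl pvStepA ([], [])
    simp only [pvF]
    by_cases he : entries = []
    · simp [he]
    · simp only [if_neg he]
      rw [if_neg (show ¬((!entries.isEmpty) = false) by simp [he])]
      rw [pvFilter_sorted]
      simp only [PySem.List.length_sorted]
      by_cases h15 : 15 < (entries.filter (fun x => decide (0 < x.1))).length
      · rw [if_pos h15, if_pos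
          (show (15:Int) < ((entries.filter (fun x => decide (0 < x.1))).length : Int) by
            exact_mod_cast h15)]
      · rw [if_neg h15, if_neg
          (show ¬((15:Int) < ((entries.filter (fun x => decide (0 < x.1))).length : Int)) by
            exact_mod_cast h15)]
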